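-- pv_equiv track=rewrite | github.com/fbv81bp/Counter_side_channel_attacks | SCA_proof_SHA3-512/chi_cpa/chi_cpa.py | chi_leakage
-- ===== SOURCE A (Python) =====
-- def chi_leakage(state_in):
--     array = [0 for i in range(5)]
--     # convert integer to array
--     for i in range(5):
--         if state_in % 2 == 1:
--             array[4-i] = 1
--         state_in //= 2
--     # calculate 1 Chi on 5 bits: Chi's are calculated independently on 5-5 bits, if that's done parallely, it just adds algorithmic noise, but the correlation still works
--     for x in range(5):
--         array[x] = array[x] ^ ((not array[(x + 1) % 5]) and array[(x + 2) % 5])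
--     # convert array to integer
--     state_out = 0
--     for i in range(5):
--         state_out *= 2
--         if array[i] == 1:
--             state_out += 1
--     return state_out
-- ===== SOURCE B (Python) =====
-- # Chi on 5 bits via a precomputed 32-entry lookup table (A's sequential in-place Chi),
-- # indexed by state_in mod 32 (Python % handles negatives the same way A's bit loop does).
-- _CHI_TABLE = [0, 5, 11, 10, 22, 17, 20, 23, 9, 12, 2, 3, 13, 8, 15, 14,
--               18, 21, 24, 27, 4, 1, 6, 7, 26, 29, 16, 19, 30, 25, 28, 31]
--
-- def chi_leakage(state_in):
--     return _CHI_TABLE[state_in % 32]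
-- ===== Notes on version B (the rewrite author's own statement) =====
-- stated objective: simpler
-- what changed: Replaces the three bit-manipulation loops with a single hardcoded 32-entry lookup table indexed by the low five bits of the input.
import Mathlib
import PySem

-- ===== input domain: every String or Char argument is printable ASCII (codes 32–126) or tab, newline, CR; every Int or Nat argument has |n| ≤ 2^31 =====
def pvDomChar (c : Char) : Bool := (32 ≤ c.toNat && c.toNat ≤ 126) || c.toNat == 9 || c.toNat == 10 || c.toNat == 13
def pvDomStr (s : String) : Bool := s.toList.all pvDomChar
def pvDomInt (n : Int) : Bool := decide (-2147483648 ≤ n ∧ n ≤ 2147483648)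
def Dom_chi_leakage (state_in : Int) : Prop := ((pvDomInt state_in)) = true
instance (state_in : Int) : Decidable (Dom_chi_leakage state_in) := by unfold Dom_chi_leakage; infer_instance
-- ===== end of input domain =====

-- B replaces A's three bit loops with one hardcoded 32-entry lookup table (objective: simpler).

-- ===== PORT A =====
-- loop 1 body: if state_in % 2 == 1: array[4-i] = 1; state_in //= 2
-- (index 4-i is always in [0,4], so pySetD is exact here)
def chiBitStep (st : List Int × Int) (i : Int) : List Int × Int :=
  let arr := if PySem.Int.mod st.2 2 = 1 then PySem.List.pySetD st.1 (4 - i) 1 else st.1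
  (arr, PySem.Int.floordiv st.2 2)

-- loop 2 body: array[x] = array[x] ^ ((not array[(x+1)%5]) and array[(x+2)%5])
-- Python `not n` is true iff n == 0; `True and n` is n, `False and n` is False (= 0 under ^);
-- indices x, (x+1)%5, (x+2)%5 are always in [0,4], so pyGetD/pySetD are exact here.
def chiMixStep (arr : List Int) (x : Int) : List Int :=
  let t : Int := if PySem.List.pyGetD arr (PySem.Int.mod (x + 1) 5) 0 = 0
                 then PySem.List.pyGetD arr (PySem.Int.mod (x + 2) 5) 0 else 0
  PySem.List.pySetD arr x (PySem.Int.bxor (PySem.List.pyGetD arr x 0) t)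

-- loop 3 body: state_out *= 2; if array[i] == 1: state_out += 1
def chiPackStep (arr : List Int) (so : Int) (i : Int) : Int :=
  let so := so * 2
  if PySem.List.pyGetD arr i 0 = 1 then so + 1 else so

def chi_leakage (state_in : Int) : Int :=
  let array : List Int := (PySem.List.pyRange 0 5 1).map (fun _ => 0)
  let p := (PySem.List.pyRange 0 5 1).foldl chiBitStep (array, state_in)
  let array := (PySem.List.pyRange 0 5 1).foldl chiMixStep p.1
  (PySem.List.pyRange 0 5 1).foldl (chiPackStep array) 0

-- ===== PORT B =====
def chiTable : List Int :=
  [0, 5, 11, 10, 22, 17, 20, 23, 9, 12, 2, 3, 13, 8, 15, 14,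
   18, 21, 24, 27, 4, 1, 6, 7, 26, 29, 16, 19, 30, 25, 28, 31]

-- _CHI_TABLE[state_in % 32]; the index is always in [0,31], so the default 0 is never used
def chi_leakage_alt (state_in : Int) : Int :=
  PySem.List.pyGetD chiTable (PySem.Int.mod state_in 32) 0

-- ===== PRECONDITION & SPEC =====
def Spec_chi_leakage (state_in : Int) (out : Int) : Prop := out = chi_leakage_alt state_in
instance (state_in : Int) (out : Int) : Decidable (Spec_chi_leakage state_in out) := by unfold Spec_chi_leakage; infer_instance

-- ===== CLAIM (what is proved, stated in full; the proofs are below) =====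
def Claim_equal_chi_leakage : Prop := ∀ (state_in : Int), Dom_chi_leakage state_in → Spec_chi_leakage state_in (chi_leakage state_in)

-- ===== LEMMAS AND PROOFS =====

-- A's result depends on state_in only through its value mod 32
theorem chi_leakage_mod (s : Int) : chi_leakage s = chi_leakage (PySem.Int.mod s 32) := by
  have hm : ∀ a : Int, PySem.Int.mod a 2 = a % 2 := fun a => PySem.Int.mod_eq_emod_of_pos (by norm_num)
  have hf : ∀ a : Int, PySem.Int.floordiv a 2 = a / 2 := fun a => PySem.Int.floordiv_eq_ediv_of_pos (by norm_num)
  have hs : PySem.Int.mod s 32 = s % 32 := PySem.Int.mod_eq_emod_of_pos (by norm_num)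
  have hr : PySem.List.pyRange 0 5 1 = [0, 1, 2, 3, 4] := by decide
  have e0 : s % 2 = s % 32 % 2 := by omega
  have e1 : s / 2 % 2 = s % 32 / 2 % 2 := by omega
  have e2 : s / 2 / 2 % 2 = s % 32 / 2 / 2 % 2 := by omega
  have e3 : s / 2 / 2 / 2 % 2 = s % 32 / 2 / 2 / 2 % 2 := by omega
  have e4 : s / 2 / 2 / 2 / 2 % 2 = s % 32 / 2 / 2 / 2 / 2 % 2 := by omega
  simp only [chi_leakage, chiBitStep, hr, hs, hm, hf, List.foldl, List.map]
  rw [e0, e1, e2, e3, e4]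

-- ===== VERDICT (by name: the statement is the Claim_ definition above) =====
theorem chi_leakage_spec : Claim_equal_chi_leakage := by
  intro s _
  unfold Spec_chi_leakage
  rw [chi_leakage_mod s]
  have h0 : 0 ≤ PySem.Int.mod s 32 := by
    rw [PySem.Int.mod_eq_emod_of_pos (by norm_num)]; exact Int.emod_nonneg s (by norm_num)
  have h1 : PySem.Int.mod s 32 < 32 := by
    rw [PySem.Int.mod_eq_emod_of_pos (by norm_num)]; exact Int.emod_lt_of_pos s (by norm_num)
  have halt : chi_leakage_alt (PySem.Int.mod s 32) = chi_leakage_alt s := by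
    unfold chi_leakage_alt
    rw [show PySem.Int.mod (PySem.Int.mod s 32) 32 = PySem.Int.mod s 32 from by
      rw [PySem.Int.mod_eq_emod_of_pos (b := 32) (by norm_num),
          PySem.Int.mod_eq_emod_of_pos (b := 32) (by norm_num)]
      exact Int.emod_emod_of_dvd s dvd_rfl]
  rw [← halt]
  set r := PySem.Int.mod s 32 with hr
  clear_value r
  interval_cases r <;> decide
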